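-- pv_equiv track=rewrite | github.com/Mejri10/codewars-solutions | 6-kyu/get-your-steppin'-on-son/python/solution.py | word_step
-- ===== SOURCE A (Python) =====
-- def word_step(s):
--     words = s.split()
--     ncolumns = sum([len(word) for word in words[::2]]) - (len(words[::2]) - 1)
--     output = []
--     trackColumn = 0
--     for i, word in enumerate(words):
--         if i % 2 == 0:  # horizontal words
--             n = len(word)
--             word = " "*trackColumn + word + " "*(ncolumns - n - trackColumn)
--             trackColumn += n - 1
--             output.append(list(word))
--         else:  # vertical words
--             _word = (word[1:] if i == len(words)-1 else word[1:-1])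
--             for ch in _word:
--                 word = " "*trackColumn + ch + " "*(ncolumns - 1 - trackColumn)
--                 output.append(list(word))
--     return output
-- ===== SOURCE B (Python) =====
-- def word_step(s):
--     words = s.split()
--     ncolumns = sum(len(w) for w in words[::2]) - (len(words[::2]) - 1)
--     segs = [w if i % 2 == 0 else (w[1:] if i == len(words) - 1 else w[1:-1])
--             for i, w in enumerate(words)]
--     nrows = sum(1 if i % 2 == 0 else len(seg) for i, seg in enumerate(segs))
--     grid = [[" "] * ncolumns for _ in range(nrows)]
--     row = 0
--     col = 0
--     for i, seg in enumerate(segs):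
--         if i % 2 == 0:
--             for j, ch in enumerate(seg):
--                 grid[row][col + j] = ch
--             row += 1
--             col += len(seg) - 1
--         else:
--             for ch in seg:
--                 grid[row][col] = ch
--                 row += 1
--     return grid
-- ===== Notes on version B (the rewrite author's own statement) =====
-- stated objective: alternative
-- what changed: Instead of appending one padded string per row built from a running column, B precomputes the segments and total row count, allocates a blank ncolumns-wide grid, and fills characters into it with a (row, col) cursor.
import Mathlib
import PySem

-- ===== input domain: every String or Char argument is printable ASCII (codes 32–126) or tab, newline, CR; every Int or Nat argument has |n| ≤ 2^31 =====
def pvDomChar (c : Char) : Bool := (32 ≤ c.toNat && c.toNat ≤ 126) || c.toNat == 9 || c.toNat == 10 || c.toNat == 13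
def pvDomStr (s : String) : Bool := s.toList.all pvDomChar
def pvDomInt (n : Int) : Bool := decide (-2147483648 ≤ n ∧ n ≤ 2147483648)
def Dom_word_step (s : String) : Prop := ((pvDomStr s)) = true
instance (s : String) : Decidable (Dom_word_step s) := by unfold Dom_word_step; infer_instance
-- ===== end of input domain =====

-- B builds the same staircase by allocating a blank grid and filling characters in with a
-- (row, col) cursor, instead of A's appending of one running-column-padded string per row.

-- ===== PORT A =====
-- list(word) turns a padded string into its one-character strings:
def pvCellOf (c : Char) : String := String.ofList [c]

-- the body of A's `for i, word in enumerate(words)` loop (ncol = ncolumns, L = len(words))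
def pvStepA (ncol L : Int) (st : Int × List (List String)) (p : Int × List Char) :
    Int × List (List String) :=
  if PySem.Int.mod p.1 2 == 0 then
    let n := PySem.List.len p.2
    (st.1 + (n - 1),
     st.2 ++ [(List.replicate st.1.toNat ' ' ++ p.2 ++
               List.replicate (ncol - n - st.1).toNat ' ').map pvCellOf])
  else
    let seg := if p.1 == L - 1 then PySem.List.slice p.2 (some 1) none
               else PySem.List.slice p.2 (some 1) (some (-1))
    (st.1,
     seg.foldl (fun out ch =>
       out ++ [(List.replicate st.1.toNat ' ' ++ [ch] ++
                List.replicate (ncol - 1 - st.1).toNat ' ').map pvCellOf]) st.2)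

def word_step (s : String) : List (List String) :=
  let words := PySem.Chars.split₀ s.toList
  let evens := (PySem.List.slice? words none none 2).getD []
  let ncolumns : Int := (evens.map (fun w => PySem.List.len w)).sum - (PySem.List.len evens - 1)
  ((PySem.List.enumerate words 0).foldl (pvStepA ncolumns (PySem.List.len words)) (0, [])).2

-- ===== PORT B =====
-- grid[r][c] = v
def pvWrite (g : List (List String)) (r c : Int) (v : String) : List (List String) :=
  PySem.List.pySetD g r (PySem.List.pySetD (PySem.List.pyGetD g r []) c v)

-- the body of B's `for i, seg in enumerate(segs)` loop; state = (grid, row, col)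
def pvStepB (st : List (List String) × Int × Int) (p : Int × List Char) :
    List (List String) × Int × Int :=
  if PySem.Int.mod p.1 2 == 0 then
    ((PySem.List.enumerate p.2 0).foldl
        (fun g q => pvWrite g st.2.1 (st.2.2 + q.1) (pvCellOf q.2)) st.1,
     st.2.1 + 1, st.2.2 + (PySem.List.len p.2 - 1))
  else
    let gr := p.2.foldl (fun (gr : List (List String) × Int) ch =>
        (pvWrite gr.1 gr.2 st.2.2 (pvCellOf ch), gr.2 + 1)) (st.1, st.2.1)
    (gr.1, gr.2, st.2.2)

def word_step_alt (s : String) : List (List String) :=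
  let words := PySem.Chars.split₀ s.toList
  let evens := (PySem.List.slice? words none none 2).getD []
  let ncolumns : Int := (evens.map (fun w => PySem.List.len w)).sum - (PySem.List.len evens - 1)
  let segs := (PySem.List.enumerate words 0).map (fun p =>
      if PySem.Int.mod p.1 2 == 0 then p.2
      else if p.1 == PySem.List.len words - 1 then PySem.List.slice p.2 (some 1) none
      else PySem.List.slice p.2 (some 1) (some (-1)))
  let nrows : Int := ((PySem.List.enumerate segs 0).map (fun p =>
      if PySem.Int.mod p.1 2 == 0 then (1 : Int) else PySem.List.len p.2)).sum
  let grid0 := List.replicate nrows.toNat (List.replicate ncolumns.toNat " ")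
  ((PySem.List.enumerate segs 0).foldl pvStepB (grid0, 0, 0)).1

-- ===== PRECONDITION & SPEC =====
def Spec_word_step (s : String) (out : List (List String)) : Prop := out = word_step_alt s
instance (s : String) (out : List (List String)) : Decidable (Spec_word_step s out) := by unfold Spec_word_step; infer_instance

-- ===== CLAIM (what is proved, stated in full; the proofs are below) =====
def Claim_equal_word_step : Prop := ∀ (s : String), Dom_word_step s → Spec_word_step s (word_step s)

-- ===== LEMMAS AND PROOFS =====

-- the vertical segment taken from an odd-indexed word
def pvSegOf (L i : Int) (w : List Char) : List Char :=
  if i == L - 1 then PySem.List.slice w (some 1) none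
  else PySem.List.slice w (some 1) (some (-1))

-- the per-word work items: (is-horizontal, characters to place)
def pvItems (L : Int) : Int → List (List Char) → List (Bool × List Char)
  | _, [] => []
  | i, w :: r =>
    (if PySem.Int.mod i 2 == 0 then (true, w) else (false, pvSegOf L i w)) :: pvItems L (i + 1) r

-- total column advance of a list of items
def pvAdv : List (Bool × List Char) → Int
  | [] => 0
  | it :: r => (if it.1 then PySem.List.len it.2 - 1 else 0) + pvAdv r

-- total number of rows a list of items produces
def pvRowsN : List (Bool × List Char) → Nat
  | [] => 0
  | it :: r => (if it.1 then 1 else it.2.length) + pvRowsN r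

-- the rows produced from column tc on (A's row expressions, verbatim)
def pvRender (ncol : Int) : Int → List (Bool × List Char) → List (List String)
  | _, [] => []
  | tc, it :: rest =>
    if it.1 then
      ((List.replicate tc.toNat ' ' ++ it.2 ++
        List.replicate (ncol - PySem.List.len it.2 - tc).toNat ' ').map pvCellOf)
        :: pvRender ncol (tc + (PySem.List.len it.2 - 1)) rest
    else
      it.2.map (fun ch => (List.replicate tc.toNat ' ' ++ [ch] ++
        List.replicate (ncol - 1 - tc).toNat ' ').map pvCellOf)
        ++ pvRender ncol tc rest

-- the words at even positions of a list (= words[::2])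
def pvEvens {α : Type} : List α → List α
  | [] => []
  | [x] => [x]
  | x :: _ :: r => x :: pvEvens r

lemma flatten_map_single {α β : Type} (f : α → β) (l : List α) :
    (l.map (fun x => [f x])).flatten = l.map f := by
  induction l with
  | nil => rfl
  | cons x r ih => simp [ih]

lemma A_loop (ncol L : Int) : ∀ (ws : List (List Char)) (i tc : Int) (out : List (List String)),
      (PySem.List.enumerate ws i).foldl (pvStepA ncol L) (tc, out)
        = (tc + pvAdv (pvItems L i ws), out ++ pvRender ncol tc (pvItems L i ws)) := by
  intro ws
  induction ws with
  | nil => intro i tc out; simp [PySem.List.enumerate_nil, pvItems, pvAdv, pvRender]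
  | cons w r ih =>
    intro i tc out
    rw [PySem.List.enumerate_cons, List.foldl_cons]
    by_cases hd : 2 ∣ i
    · rw [show pvStepA ncol L (tc, out) (i, w)
          = (tc + (PySem.List.len w - 1),
             out ++ [(List.replicate tc.toNat ' ' ++ w ++
               List.replicate (ncol - PySem.List.len w - tc).toNat ' ').map pvCellOf]) by
        simp [pvStepA, hd]]
      rw [ih]
      simp only [pvItems, pvAdv, pvRender]
      simp [hd, List.append_assoc]
      ring
    · rw [show pvStepA ncol L (tc, out) (i, w)
          = (tc, out ++ (pvSegOf L i w).map (fun ch =>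
              (List.replicate tc.toNat ' ' ++ [ch] ++
               List.replicate (ncol - 1 - tc).toNat ' ').map pvCellOf)) by
        simp [pvStepA, pvSegOf, hd]
        exact flatten_map_single _ _]
      rw [ih]
      simp only [pvItems, pvAdv, pvRender]
      simp [hd, List.append_assoc]


lemma pvWrite_at (done rest : List (List String)) (r0 : List String) (c : Int) (v : String) :
    pvWrite (done ++ r0 :: rest) (done.length : Int) c v
      = done ++ (PySem.List.pySetD r0 c v) :: rest := by
  unfold pvWrite
  rw [PySem.List.pyGetD_natCast, PySem.List.pySetD_natCast]
  rw [List.set_append_right _ _ (le_refl _)]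
  simp [List.getD]

lemma fill_grid_row (tc : Int) : ∀ (w : List Char) (s : Int) (done rest : List (List String)) (r0 : List String),
    (PySem.List.enumerate w s).foldl
        (fun g q => pvWrite g (done.length : Int) (tc + q.1) (pvCellOf q.2)) (done ++ r0 :: rest)
      = done ++ ((PySem.List.enumerate w s).foldl
          (fun r q => PySem.List.pySetD r (tc + q.1) (pvCellOf q.2)) r0) :: rest := by
  intro w
  induction w with
  | nil => intro s done rest r0; simp [PySem.List.enumerate_nil]
  | cons ch w ih =>
    intro s done rest r0
    rw [PySem.List.enumerate_cons, List.foldl_cons, List.foldl_cons, pvWrite_at]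
    exact ih (s+1) done rest _

lemma fill_row (tc : Nat) : ∀ (w : List Char) (s : Nat) (r : List String),
    tc + s + w.length ≤ r.length →
    (PySem.List.enumerate w (s : Int)).foldl
        (fun r q => PySem.List.pySetD r ((tc : Int) + q.1) (pvCellOf q.2)) r
      = r.take (tc + s) ++ w.map pvCellOf ++ r.drop (tc + s + w.length) := by
  intro w
  induction w with
  | nil =>
    intro s r h
    simp [PySem.List.enumerate_nil]
  | cons ch w ih =>
    intro s r h
    rw [PySem.List.enumerate_cons, List.foldl_cons]
    have hcast : (tc : Int) + (s : Int) = ((tc + s : Nat) : Int) := by push_cast; ring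
    rw [hcast, PySem.List.pySetD_natCast]
    have hlen : tc + s < r.length := by simp at h; omega
    have hset : r.set (tc+s) (pvCellOf ch)
        = r.take (tc+s) ++ pvCellOf ch :: r.drop (tc+s+1) := by
      rw [List.set_eq_take_append_cons_drop, if_pos hlen]
    have hs1 : ((s:Int) + 1) = ((s+1 : Nat) : Int) := by push_cast; ring
    rw [hs1, hset]
    have hlen2 : tc + (s+1) + w.length ≤ (r.take (tc+s) ++ pvCellOf ch :: r.drop (tc+s+1)).length := by
      simp at h ⊢
      omega
    rw [ih (s+1) _ hlen2]
    have hA : (r.take (tc+s)).length = tc + s := by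
      simp [List.length_take]
      omega
    have htk : (r.take (tc+s) ++ pvCellOf ch :: r.drop (tc+s+1)).take (tc + (s+1))
        = r.take (tc+s) ++ [pvCellOf ch] := by
      rw [List.take_append, hA]
      have h1 : tc + (s+1) - (tc+s) = 1 := by omega
      rw [List.take_of_length_le (by omega), h1]
      rfl
    have hdr : (r.take (tc+s) ++ pvCellOf ch :: r.drop (tc+s+1)).drop (tc + (s+1) + w.length)
        = r.drop (tc + s + (ch :: w).length) := by
      rw [List.drop_append, hA]
      rw [List.drop_of_length_le (by omega)]
      have h1 : tc + (s+1) + w.length - (tc+s) = w.length + 1 := by omega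
      rw [h1]
      simp [List.drop_drop]
      congr 1
      omega
    rw [htk, hdr]
    simp

lemma fill_col (ncolN tc : Nat) (htc : tc < ncolN) :
    ∀ (seg : List Char) (done : List (List String)) (m : Nat),
    seg.foldl (fun (gr : List (List String) × Int) ch =>
        (pvWrite gr.1 gr.2 ((tc : Nat) : Int) (pvCellOf ch), gr.2 + 1))
      (done ++ List.replicate (seg.length + m) (List.replicate ncolN " "), (done.length : Int))
    = (done ++ seg.map (fun ch => List.replicate tc " " ++ pvCellOf ch :: List.replicate (ncolN - tc - 1) " ")
            ++ List.replicate m (List.replicate ncolN " "),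
       (done.length : Int) + seg.length) := by
  intro seg
  induction seg with
  | nil => intro done m; simp
  | cons ch seg ih =>
    intro done m
    rw [List.foldl_cons]
    have hrep : List.replicate ((ch :: seg).length + m) (List.replicate ncolN (" " : String))
        = List.replicate ncolN (" " : String) :: List.replicate (seg.length + m) (List.replicate ncolN " ") := by
      simp [List.length_cons]
      rw [show seg.length + 1 + m = (seg.length + m) + 1 by omega, List.replicate_succ]
    rw [hrep, pvWrite_at]
    have hsetb : PySem.List.pySetD (List.replicate ncolN (" " : String)) ((tc : Nat) : Int) (pvCellOf ch)
        = List.replicate tc " " ++ pvCellOf ch :: List.replicate (ncolN - tc - 1) " " := by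
      rw [PySem.List.pySetD_natCast]
      rw [List.set_eq_take_append_cons_drop, if_pos (by simpa using htc)]
      simp [List.take_replicate, List.drop_replicate]
      rw [Nat.min_eq_left (le_of_lt htc)]
      congr 3
    rw [hsetb]
    have hassoc : done ++ (List.replicate tc (" ":String) ++ pvCellOf ch :: List.replicate (ncolN - tc - 1) " ")
          :: List.replicate (seg.length + m) (List.replicate ncolN " ")
        = (done ++ [List.replicate tc " " ++ pvCellOf ch :: List.replicate (ncolN - tc - 1) " "])
          ++ List.replicate (seg.length + m) (List.replicate ncolN " ") := by
      simp
    rw [hassoc]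
    have hlen1 : ((done ++ [List.replicate tc (" ":String) ++ pvCellOf ch :: List.replicate (ncolN - tc - 1) " "]).length : Int)
        = (done.length : Int) + 1 := by simp
    rw [show (done.length : Int) + 1 = ((done ++ [List.replicate tc (" ":String) ++ pvCellOf ch :: List.replicate (ncolN - tc - 1) " "]).length : Int) by rw [hlen1]]
    rw [ih]
    simp
    push_cast
    ring

lemma pvItems_horiz (L : Int) :
    ∀ (ws : List (List Char)) (i : Int) (it : Bool × List Char),
      it ∈ pvItems L i ws → it.1 = true → it.2 ∈ ws := by
  intro ws
  induction ws with
  | nil => intro i it h; simp [pvItems] at h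
  | cons w r ih =>
    intro i it h hb
    simp only [pvItems, List.mem_cons] at h
    rcases h with h | h
    · cases hc : (PySem.Int.mod i 2 == 0) with
      | true => simp only [hc, if_true] at h; simp [h]
      | false =>
        simp only [hc, Bool.false_eq_true, if_false] at h
        rw [h] at hb
        simp at hb
    · exact List.mem_cons_of_mem _ (ih (i+1) it h hb)

lemma pvAdv_nonneg :
    ∀ (items : List (Bool × List Char)),
      (∀ it ∈ items, it.1 = true → it.2 ≠ []) → 0 ≤ pvAdv items := by
  intro items
  induction items with
  | nil => simp [pvAdv]
  | cons it r ih =>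
    intro h
    have h1 := h it (by simp)
    have h2 : 0 ≤ pvAdv r := ih (fun x hx => h x (by simp [hx]))
    by_cases hb : it.1 = true
    · have hne := h1 hb
      have hlen : 1 ≤ (it.2.length : Int) := by
        cases hcc : it.2 with
        | nil => exact absurd hcc hne
        | cons a b => simp [hcc]
      simp only [pvAdv, hb, if_true, PySem.List.len_eq]
      omega
    · rw [Bool.not_eq_true] at hb
      simp only [pvAdv, hb, Bool.false_eq_true, if_false]
      omega

lemma pvCell_space : pvCellOf ' ' = " " := rfl

lemma B_loop (ncol L : Int) :
    ∀ (ws : List (List Char)) (i tc : Int) (done : List (List String)),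
      0 ≤ tc →
      tc + pvAdv (pvItems L i ws) ≤ ncol - 1 →
      (∀ w ∈ ws, w ≠ []) →
      (PySem.List.enumerate ws i).foldl
          (fun st p => pvStepB st (p.1,
            if PySem.Int.mod p.1 2 == 0 then p.2
            else if p.1 == L - 1 then PySem.List.slice p.2 (some 1) none
            else PySem.List.slice p.2 (some 1) (some (-1))))
          (done ++ List.replicate (pvRowsN (pvItems L i ws)) (List.replicate ncol.toNat " "),
           (done.length : Int), tc)
        = (done ++ pvRender ncol tc (pvItems L i ws),
           (done.length : Int) + pvRowsN (pvItems L i ws),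
           tc + pvAdv (pvItems L i ws)) := by
  intro ws
  induction ws with
  | nil =>
    intro i tc done h0 hb hws
    simp [PySem.List.enumerate_nil, pvItems, pvRowsN, pvRender, pvAdv]
  | cons w r ih =>
    intro i tc done h0 hb hws
    have hwne := hws w (by simp)
    have hwlen : 1 ≤ (w.length : Int) := by
      cases hcc : w with
      | nil => exact absurd hcc hwne
      | cons a b => simp [hcc]
    have hadvr : 0 ≤ pvAdv (pvItems L (i+1) r) := by
      apply pvAdv_nonneg
      intro it hit hb1
      have := pvItems_horiz L r (i+1) it hit hb1
      intro hnil
      exact hws it.2 (by simp [this]) hnil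
    rw [PySem.List.enumerate_cons, List.foldl_cons]
    by_cases hd : 2 ∣ i
    · -- horizontal word
      have hitems : pvItems L i (w :: r) = (true, w) :: pvItems L (i+1) r := by
        simp [pvItems, hd]
      rw [hitems] at hb ⊢
      have hadv : pvAdv ((true, w) :: pvItems L (i+1) r)
          = ((w.length : Int) - 1) + pvAdv (pvItems L (i+1) r) := by
        simp [pvAdv, PySem.List.len_eq]
      rw [hadv] at hb
      have hbound : tc + (w.length : Int) ≤ ncol := by omega
      have hrowsN : pvRowsN ((true, w) :: pvItems L (i+1) r) = 1 + pvRowsN (pvItems L (i+1) r) := by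
        simp [pvRowsN]
      rw [hrowsN, show (1 : Nat) + pvRowsN (pvItems L (i+1) r) = pvRowsN (pvItems L (i+1) r) + 1 by omega,
          List.replicate_succ]
      set rest := List.replicate (pvRowsN (pvItems L (i+1) r)) (List.replicate ncol.toNat (" " : String)) with hrest
      set blank := List.replicate ncol.toNat (" " : String) with hblank
      -- the step on the horizontal word
      have hproj : (((i, w).1 : Int),
            if PySem.Int.mod (i, w).1 2 == 0 then (i, w).2
            else if (i, w).1 == L - 1 then PySem.List.slice (i, w).2 (some 1) none
            else PySem.List.slice (i, w).2 (some 1) (some (-1))) = (i, w) := by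
        simp [hd]
      rw [hproj]
      have hstep : pvStepB (done ++ blank :: rest, (done.length : Int), tc) (i, w)
          = ((PySem.List.enumerate w 0).foldl
               (fun g q => pvWrite g (done.length : Int) (tc + q.1) (pvCellOf q.2)) (done ++ blank :: rest),
             (done.length : Int) + 1, tc + ((w.length : Int) - 1)) := by
        simp [pvStepB, hd, PySem.List.len_eq]
      rw [hstep, fill_grid_row]
      -- the filled first row
      have htc : tc = ((tc.toNat : Nat) : Int) := (Int.toNat_of_nonneg h0).symm
      have hfill : (PySem.List.enumerate w 0).foldl
            (fun r q => PySem.List.pySetD r (tc + q.1) (pvCellOf q.2)) blank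
          = (List.replicate tc.toNat ' ' ++ w ++
             List.replicate (ncol - PySem.List.len w - tc).toNat ' ').map pvCellOf := by
        have hb' : tc.toNat + 0 + w.length ≤ blank.length := by
          rw [hblank, List.length_replicate]
          omega
        have hfr := fill_row tc.toNat w 0 blank hb'
        rw [Nat.cast_zero] at hfr
        conv_lhs => rw [htc]
        rw [hfr]
        simp [hblank, List.take_replicate, List.drop_replicate, pvCell_space, PySem.List.len_eq]
        rw [Nat.min_eq_left (by omega)]
        have hnum : (ncol - (w.length : Int) - tc).toNat = ncol.toNat - (tc.toNat + w.length) := by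
          omega
        rw [hnum]
      rw [hfill]
      -- reassociate and apply the IH
      have hassoc : done ++ ((List.replicate tc.toNat ' ' ++ w ++
             List.replicate (ncol - PySem.List.len w - tc).toNat ' ').map pvCellOf) :: rest
          = (done ++ [(List.replicate tc.toNat ' ' ++ w ++
             List.replicate (ncol - PySem.List.len w - tc).toNat ' ').map pvCellOf]) ++ rest := by
        simp
      have hlen1 : (done.length : Int) + 1
          = (((done ++ [(List.replicate tc.toNat ' ' ++ w ++
             List.replicate (ncol - PySem.List.len w - tc).toNat ' ').map pvCellOf]).length : Nat) : Int) := by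
        simp
      rw [hassoc, hlen1, hrest, ih (i+1) (tc + ((w.length:Int) - 1)) _ (by omega) (by omega)
            (fun v hv => hws v (by simp [hv]))]
      -- both sides are now explicit; compare componentwise
      refine Prod.ext ?_ (Prod.ext ?_ ?_)
      · show _ = done ++ pvRender ncol tc ((true, w) :: pvItems L (i+1) r)
        rw [show pvRender ncol tc ((true, w) :: pvItems L (i+1) r)
            = ((List.replicate tc.toNat ' ' ++ w ++
               List.replicate (ncol - PySem.List.len w - tc).toNat ' ').map pvCellOf)
              :: pvRender ncol (tc + (PySem.List.len w - 1)) (pvItems L (i+1) r) from by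
          simp [pvRender]]
        simp [PySem.List.len_eq]
      · show _ = _
        simp
        push_cast
        ring
      · show _ = _
        simp [pvAdv, PySem.List.len_eq]
        ring
    · -- vertical word
      have hitems : pvItems L i (w :: r) = (false, pvSegOf L i w) :: pvItems L (i+1) r := by
        simp [pvItems, hd]
      rw [hitems] at hb ⊢
      have hadv : pvAdv ((false, pvSegOf L i w) :: pvItems L (i+1) r)
          = pvAdv (pvItems L (i+1) r) := by
        simp [pvAdv]
      rw [hadv] at hb ⊢
      have hncol : 0 ≤ ncol - 1 := by omega
      have htcn : tc.toNat < ncol.toNat := by omega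
      have hrowsN : pvRowsN ((false, pvSegOf L i w) :: pvItems L (i+1) r)
          = (pvSegOf L i w).length + pvRowsN (pvItems L (i+1) r) := by
        simp [pvRowsN]
      rw [hrowsN]
      have hproj : (((i, w).1 : Int),
            if PySem.Int.mod (i, w).1 2 == 0 then (i, w).2
            else if (i, w).1 == L - 1 then PySem.List.slice (i, w).2 (some 1) none
            else PySem.List.slice (i, w).2 (some 1) (some (-1))) = (i, pvSegOf L i w) := by
        simp [hd, pvSegOf]
      rw [hproj]
      have htc : tc = ((tc.toNat : Nat) : Int) := (Int.toNat_of_nonneg h0).symm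
      have hfc := fill_col ncol.toNat tc.toNat htcn (pvSegOf L i w) done (pvRowsN (pvItems L (i+1) r))
      rw [← htc] at hfc
      have hstep : pvStepB (done ++ List.replicate ((pvSegOf L i w).length + pvRowsN (pvItems L (i+1) r))
              (List.replicate ncol.toNat " "), (done.length : Int), tc) (i, pvSegOf L i w)
          = (done ++ (pvSegOf L i w).map (fun ch => List.replicate tc.toNat " "
                ++ pvCellOf ch :: List.replicate (ncol.toNat - tc.toNat - 1) " ")
              ++ List.replicate (pvRowsN (pvItems L (i+1) r)) (List.replicate ncol.toNat " "),
             (done.length : Int) + (pvSegOf L i w).length, tc) := by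
        simp only [pvStepB, hd]
        simp only [show (PySem.Int.mod i 2 == 0) = false by simp [hd]]
        simp only [Bool.false_eq_true, if_false]
        rw [hfc]
      rw [hstep]
      -- rewrite the produced rows into pvRender's form
      have hmap : (pvSegOf L i w).map (fun ch => List.replicate tc.toNat (" " : String)
                ++ pvCellOf ch :: List.replicate (ncol.toNat - tc.toNat - 1) " ")
          = (pvSegOf L i w).map (fun ch => (List.replicate tc.toNat ' ' ++ [ch] ++
              List.replicate (ncol - 1 - tc).toNat ' ').map pvCellOf) := by
        apply List.map_congr_left
        intro ch _
        simp [pvCell_space]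
        congr 1
        omega
      rw [hmap]
      have hassoc : done ++ ((pvSegOf L i w).map (fun ch => (List.replicate tc.toNat ' ' ++ [ch] ++
              List.replicate (ncol - 1 - tc).toNat ' ').map pvCellOf))
            ++ List.replicate (pvRowsN (pvItems L (i+1) r)) (List.replicate ncol.toNat " ")
          = (done ++ (pvSegOf L i w).map (fun ch => (List.replicate tc.toNat ' ' ++ [ch] ++
              List.replicate (ncol - 1 - tc).toNat ' ').map pvCellOf))
            ++ List.replicate (pvRowsN (pvItems L (i+1) r)) (List.replicate ncol.toNat " ") := by
        simp
      have hlen1 : (done.length : Int) + (pvSegOf L i w).length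
          = (((done ++ (pvSegOf L i w).map (fun ch => (List.replicate tc.toNat ' ' ++ [ch] ++
              List.replicate (ncol - 1 - tc).toNat ' ').map pvCellOf)).length : Nat) : Int) := by
        simp
      rw [hassoc, hlen1, ih (i+1) tc _ h0 (by omega) (fun v hv => hws v (by simp [hv]))]
      refine Prod.ext ?_ (Prod.ext ?_ ?_)
      · show _ = done ++ pvRender ncol tc ((false, pvSegOf L i w) :: pvItems L (i+1) r)
        rw [show pvRender ncol tc ((false, pvSegOf L i w) :: pvItems L (i+1) r)
            = (pvSegOf L i w).map (fun ch => (List.replicate tc.toNat ' ' ++ [ch] ++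
                List.replicate (ncol - 1 - tc).toNat ' ').map pvCellOf)
              ++ pvRender ncol tc (pvItems L (i+1) r) from by
          simp [pvRender]]
        simp
      · show _ = _
        simp
        push_cast
        ring
      · show _ = _
        simp

lemma split₀go_ne_nil : ∀ (s cur : List Char) (acc : List (List Char)),
    (∀ w ∈ acc, w ≠ []) → ∀ w ∈ PySem.Chars.split₀.go s cur acc, w ≠ [] := by
  intro s
  induction s with
  | nil =>
    intro cur acc hacc w hw
    rw [PySem.Chars.split₀.go] at hw
    by_cases hcur : cur.isEmpty = true
    · simp only [hcur, if_true, List.mem_reverse] at hw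
      exact hacc w hw
    · simp only [hcur, if_false] at hw
      simp at hw
      rcases hw with hw | hw
      · exact hacc w hw
      · subst hw
        intro hnil
        exact hcur (by simpa using hnil)
  | cons c rest ih =>
    intro cur acc hacc w hw
    rw [PySem.Chars.split₀.go] at hw
    by_cases hsp : PySem.Chars.isspace c = true
    · by_cases hcur : cur.isEmpty = true
      · simp only [hsp, hcur, if_true] at hw
        exact ih [] acc hacc w hw
      · simp only [hsp, hcur, if_true, if_false] at hw
        refine ih [] _ ?_ w hw
        intro v hv
        rcases List.mem_cons.mp hv with hv | hv
        · subst hv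
          simp only [List.isEmpty_iff] at hcur
          simpa using hcur
        · exact hacc v hv
    · simp only [hsp, if_false] at hw
      exact ih (c :: cur) acc hacc w hw

lemma split₀_ne_nil (s : List Char) : ∀ w ∈ PySem.Chars.split₀ s, w ≠ [] := by
  rw [PySem.Chars.split₀]
  exact split₀go_ne_nil s [] [] (by simp)

lemma evens_aux {α : Type} : ∀ (xs : List α),
    List.filterMap (fun k => xs[2*k]?) (List.range ((xs.length+1)/2)) = pvEvens xs := by
  intro xs
  induction xs using pvEvens.induct with
  | case1 => simp [pvEvens]
  | case2 x => simp [pvEvens, List.range_succ]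
  | case3 x y r ih =>
    have hlen : ((x :: y :: r).length + 1)/2 = (r.length+1)/2 + 1 := by simp; omega
    rw [hlen, List.range_succ_eq_map, List.filterMap_cons, List.filterMap_map]
    norm_num
    show _ :: List.filterMap _ _ = pvEvens (x :: y :: r)
    have hfun : (fun k : Nat => (x :: y :: r)[2 * (k+1)]?) = (fun k => r[2*k]?) := by
      funext k
      have h2 : 2 * (k+1) = (2*k) + 1 + 1 := by omega
      rw [h2]
      simp
    rw [hfun, ih]
    rfl

lemma slice2_eq {α : Type} (xs : List α) :
    (PySem.List.slice? xs none none 2).getD [] = pvEvens xs := by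
  simp only [PySem.List.slice?, PySem.List.sliceIndices]
  norm_num
  have h1 : (fun (x : Nat) => xs[(2 * (x:Int)).toNat]?) = (fun k => xs[2*k]?) := by
    funext k
    congr 1
  have h2 : (if 0 < xs.length then (((xs.length:Int) + 2 - 1) / 2).toNat else 0) = (xs.length + 1)/2 := by
    split_ifs with h
    · omega
    · omega
  rw [h1, h2, evens_aux]

lemma pvAdv_pvItems (L : Int) :
    ∀ (ws : List (List Char)) (m : Int), 2 ∣ m →
      pvAdv (pvItems L m ws) = ((pvEvens ws).map (fun w => PySem.List.len w - 1)).sum := by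
  intro ws
  induction ws using pvEvens.induct with
  | case1 => intro m _; simp [pvItems, pvAdv, pvEvens]
  | case2 x =>
    intro m h
    simp [pvItems, pvAdv, pvEvens, h]
  | case3 x y r ih =>
    intro m h
    have h1 : ¬ 2 ∣ (m + 1) := by omega
    have h2 : 2 ∣ (m + 1 + 1) := by omega
    simp only [pvItems, pvAdv, pvEvens]
    rw [ih (m+1+1) h2]
    simp [h, h1, PySem.List.len_eq]

lemma sum_len_sub_one (l : List (List Char)) :
    (l.map (fun w => PySem.List.len w - 1)).sum = (l.map (fun w => PySem.List.len w)).sum - l.length := by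
  induction l with
  | nil => simp
  | cons x r ih =>
    simp only [List.map_cons, List.sum_cons, List.length_cons]
    rw [ih]
    push_cast
    ring

lemma enumerate_map_enum {α β : Type} (F : Int × α → β) :
    ∀ (ws : List α) (i : Int),
      PySem.List.enumerate (((PySem.List.enumerate ws i)).map F) i
        = (PySem.List.enumerate ws i).map (fun p => (p.1, F p)) := by
  intro ws
  induction ws with
  | nil => simp [PySem.List.enumerate_nil]
  | cons x r ih => intro i; simp [PySem.List.enumerate_cons, ih]

lemma nrows_eq (L : Int) :
    ∀ (ws : List (List Char)) (i : Int),
      (((PySem.List.enumerate ws i)).map (fun p =>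
          if PySem.Int.mod p.1 2 == 0 then (1 : Int)
          else PySem.List.len (if PySem.Int.mod p.1 2 == 0 then p.2
            else if p.1 == L - 1 then PySem.List.slice p.2 (some 1) none
            else PySem.List.slice p.2 (some 1) (some (-1))))).sum
        = (pvRowsN (pvItems L i ws) : Int) := by
  intro ws
  induction ws with
  | nil => intro i; simp [PySem.List.enumerate_nil, pvItems, pvRowsN]
  | cons w r ihw =>
    intro i
    rw [PySem.List.enumerate_cons]
    simp only [List.map_cons, List.sum_cons, ihw (i+1)]
    by_cases hd : 2 ∣ i
    · simp [pvItems, pvRowsN, hd]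
    · simp [pvItems, pvRowsN, pvSegOf, hd, PySem.List.len_eq]


-- ===== VERDICT (by name: the statement is the Claim_ definition above) =====
lemma main_eq (s : String) : word_step s = word_step_alt s := by
  unfold word_step word_step_alt
  dsimp only []
  set ws := PySem.Chars.split₀ s.toList with hws
  set evens := (PySem.List.slice? ws none none 2).getD [] with hevens
  set ncol := (evens.map (fun w => PySem.List.len w)).sum - (PySem.List.len evens - 1) with hncol
  set L := PySem.List.len ws with hL
  -- A's loop
  rw [A_loop ncol L ws 0 0 []]
  -- B's enumerate over segs
  rw [enumerate_map_enum, List.foldl_map, List.map_map]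
  have hnr : ((PySem.List.enumerate ws 0).map
        ((fun p => if PySem.Int.mod p.1 2 == 0 then (1 : Int) else PySem.List.len p.2) ∘
          (fun p => (p.1,
            if PySem.Int.mod p.1 2 == 0 then p.2
            else if p.1 == L - 1 then PySem.List.slice p.2 (some 1) none
            else PySem.List.slice p.2 (some 1) (some (-1)))))).sum
      = (pvRowsN (pvItems L 0 ws) : Int) := by
    rw [show ((fun (p : Int × List Char) => if PySem.Int.mod p.1 2 == 0 then (1 : Int) else PySem.List.len p.2) ∘
          (fun (p : Int × List Char) => (p.1,
            if PySem.Int.mod p.1 2 == 0 then p.2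
            else if p.1 == L - 1 then PySem.List.slice p.2 (some 1) none
            else PySem.List.slice p.2 (some 1) (some (-1)))))
        = (fun (p : Int × List Char) =>
          if PySem.Int.mod p.1 2 == 0 then (1 : Int)
          else PySem.List.len (if PySem.Int.mod p.1 2 == 0 then p.2
            else if p.1 == L - 1 then PySem.List.slice p.2 (some 1) none
            else PySem.List.slice p.2 (some 1) (some (-1)))) from by
      funext p
      by_cases hd : 2 ∣ p.1
      · simp [hd]
      · simp [hd]]
    exact nrows_eq L ws 0
  rw [hnr, Int.toNat_natCast]
  -- the column invariant
  have hadv : pvAdv (pvItems L 0 ws) = ncol - 1 := by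
    rw [pvAdv_pvItems L ws 0 ⟨0, by ring⟩, sum_len_sub_one]
    rw [hncol, hevens, slice2_eq]
    simp [PySem.List.len_eq]
    ring
  have hB := B_loop ncol L ws 0 0 [] (le_refl 0) (by omega) (split₀_ne_nil s.toList)
  simp only [List.nil_append, List.length_nil, Nat.cast_zero] at hB
  rw [hB]
  simp

theorem word_step_spec : Claim_equal_word_step := by
  intro s _
  show word_step s = word_step_alt s
  exact main_eq s
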